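-- pv_equiv track=rewrite | github.com/mitsuo0114/competitive_programming | python/atcoder/Beginner058/C.py | solve
-- ===== SOURCE A (Python) =====
-- from collections import Counter
-- import string
--
-- def solve(N, Ss):
--     counters = []
--     for s in Ss:
--         counters.append(Counter(s))
--     ans = ""
--     for c in string.ascii_lowercase:
--         vs = [counter[c] for counter in counters if c in counter]
--         if len(vs) == N:
--             ans += c * min(vs)
--     return ans
-- ===== SOURCE B (Python) =====
-- import string
--
--
-- def solve(N, Ss):
--     # One pass over per-string counts: df[c] = how many strings contain c,
--     # minc[c] = minimum count of c among strings that contain it.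
--     df = {}
--     minc = {}
--     for s in Ss:
--         cnt = {}
--         for ch in s:
--             cnt[ch] = cnt.get(ch, 0) + 1
--         for ch, v in cnt.items():
--             df[ch] = df.get(ch, 0) + 1
--             if ch not in minc or v < minc[ch]:
--                 minc[ch] = v
--     ans = []
--     for c in string.ascii_lowercase:
--         if df.get(c, 0) == N:
--             ans.append(c * minc.get(c, 0))
--     return "".join(ans)
-- ===== Notes on version B (the rewrite author's own statement) =====
-- stated objective: faster
-- what changed: Instead of materializing a Counter per string and re-scanning the whole counter list once per letter (26 passes with dict lookups), B makes one pass over the per-string counts accumulating two dicts (df = in how many strings each letter occurs, minc = minimum per-string count) and then emits letter*minc[c] for the letters with df[c]==N.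
import Mathlib
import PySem

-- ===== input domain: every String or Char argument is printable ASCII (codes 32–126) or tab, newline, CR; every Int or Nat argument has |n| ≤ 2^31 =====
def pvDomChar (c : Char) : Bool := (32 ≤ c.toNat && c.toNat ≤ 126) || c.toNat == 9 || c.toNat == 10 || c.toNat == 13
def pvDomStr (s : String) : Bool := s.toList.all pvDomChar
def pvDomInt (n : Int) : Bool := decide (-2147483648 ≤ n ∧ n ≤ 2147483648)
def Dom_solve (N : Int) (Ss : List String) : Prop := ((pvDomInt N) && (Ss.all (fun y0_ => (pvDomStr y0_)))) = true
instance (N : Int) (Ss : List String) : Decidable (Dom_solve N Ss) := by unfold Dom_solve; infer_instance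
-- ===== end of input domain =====

-- B replaces A's per-letter rescans of all Counters by one pass building df (string-frequency)
-- and minc (minimum per-string count) dicts; equal on Pre_ (outside it A raises ValueError, B returns "").


-- ===== PORT A =====
-- string.ascii_lowercase
def pvLetters : List Char := "abcdefghijklmnopqrstuvwxyz".toList

-- port of A; min(vs) on an empty vs is a ValueError, ported totalized as (min? …).getD 0 and
-- excluded by Pre_solve; 'c * k' for k : Int is String.mk (List.replicate k.toNat c) (exact).
def solve (N : Int) (Ss : List String) : String :=
  let counters := Ss.foldl (fun acc s => acc ++ [PySem.Dict.counter s.toList]) []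
  pvLetters.foldl (fun ans c =>
    let vs := counters.foldl (fun vs ctr =>
      if ctr.contains c then vs ++ [ctr.getD c 0] else vs) ([] : List Int)
    if (vs.length : Int) = N then
      ans ++ String.mk (List.replicate ((PySem.List.min? vs (fun x => x)).getD 0).toNat c)
    else ans) ""

-- ===== PORT B =====
-- body of B's 'for ch, v in cnt.items()' loop (df/minc updates)
def pvInnerStep (q : PySem.Dict Char Int × PySem.Dict Char Int) (kv : Char × Int) :
    PySem.Dict Char Int × PySem.Dict Char Int :=
  (q.1.insert kv.1 (q.1.getD kv.1 0 + 1),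
   if (!q.2.contains kv.1) || decide (kv.2 < q.2.getD kv.1 0) then q.2.insert kv.1 kv.2 else q.2)

-- body of B's 'for s in Ss' loop: count the string by hand, then fold its items
def pvOuterStep (q : PySem.Dict Char Int × PySem.Dict Char Int) (s : String) :
    PySem.Dict Char Int × PySem.Dict Char Int :=
  let cnt := s.toList.foldl (fun d ch => d.insert ch (d.getD ch 0 + 1)) PySem.Dict.empty
  cnt.items.foldl pvInnerStep q

def solve_alt (N : Int) (Ss : List String) : String :=
  let p := Ss.foldl pvOuterStep (PySem.Dict.empty, PySem.Dict.empty)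
  PySem.Str.join "" (pvLetters.foldl (fun ans c =>
    if p.1.getD c 0 = N then ans ++ [String.mk (List.replicate (p.2.getD c 0).toNat c)] else ans) [])

-- ===== PRECONDITION & SPEC =====
-- Pre_ excludes exactly the inputs where A raises ValueError (min of an empty list): N = 0
-- while some lowercase letter occurs in no string of Ss.
def Pre_solve (N : Int) (Ss : List String) : Prop :=
  N ≠ 0 ∨ ∀ c ∈ pvLetters, ∃ s ∈ Ss, c ∈ s.toList
instance (N : Int) (Ss : List String) : Decidable (Pre_solve N Ss) := by
  unfold Pre_solve; infer_instance

def pvWitness_solve : Int × List String := (2, ["ab", "aab"])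

def Spec_solve (N : Int) (Ss : List String) (out : String) : Prop := out = solve_alt N Ss
instance (N : Int) (Ss : List String) (out : String) : Decidable (Spec_solve N Ss out) := by
  unfold Spec_solve; infer_instance

-- ===== CLAIM (what is proved, stated in full; the proofs are below) =====
def Claim_equal_solve : Prop :=
  ∀ (N : Int) (Ss : List String), Dom_solve N Ss → Pre_solve N Ss → Spec_solve N Ss (solve N Ss)

-- ===== LEMMAS AND PROOFS =====

-- minimum-update on an optional running minimum (what B's minc update does at a hit key)
def pvCombine (o : Option Int) (v : Int) : Option Int :=
  some (match o with | none => v | some m => if v < m then v else m)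

-- A's per-letter value list, in closed form
def pvVs (c : Char) (Ss : List String) : List Int :=
  (Ss.filter (fun s => decide (c ∈ s.toList))).map (fun s => (s.toList.count c : Int))

theorem pvInner_miss (L : List (Char × Int)) (c : Char)
    (h : c ∉ L.map Prod.fst) (q : PySem.Dict Char Int × PySem.Dict Char Int) :
    (L.foldl pvInnerStep q).1.get? c = q.1.get? c ∧
    (L.foldl pvInnerStep q).2.get? c = q.2.get? c := by
  induction L generalizing q with
  | nil => exact ⟨rfl, rfl⟩
  | cons kv T ih =>
    simp only [List.map_cons, List.mem_cons, not_or] at h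
    obtain ⟨hk, hT⟩ := h
    have := ih hT (pvInnerStep q kv)
    refine ⟨?_, ?_⟩ <;> simp only [List.foldl_cons] at *
    · rw [this.1]
      simp [pvInnerStep, PySem.Dict.get?_insert, hk]
    · rw [this.2]
      simp only [pvInnerStep]
      split
      · simp [PySem.Dict.get?_insert, hk]
      · rfl

theorem pvInner_hit (L : List (Char × Int)) (c : Char) (v : Int)
    (hmem : (c, v) ∈ L) (hnd : (L.map Prod.fst).Nodup)
    (q : PySem.Dict Char Int × PySem.Dict Char Int) :
    (L.foldl pvInnerStep q).1.get? c = some (q.1.getD c 0 + 1) ∧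
    (L.foldl pvInnerStep q).2.get? c = pvCombine (q.2.get? c) v := by
  induction L generalizing q with
  | nil => cases hmem
  | cons kv T ih =>
    simp only [List.map_cons, List.nodup_cons] at hnd
    by_cases hk : kv.1 = c
    · have hcT : c ∉ T.map Prod.fst := hk ▸ hnd.1
      have hv : kv.2 = v := by
        rcases List.mem_cons.mp hmem with h | h
        · rw [← h]
        · exact absurd (List.mem_map_of_mem (f := Prod.fst) h) hcT
      have hmiss := pvInner_miss T c hcT (pvInnerStep q kv)
      simp only [List.foldl_cons]
      rw [hmiss.1, hmiss.2]
      subst hk; subst hv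
      constructor
      · simp [pvInnerStep, PySem.Dict.get?_insert]
      · simp only [pvInnerStep, pvCombine]
        cases hq : q.2.get? kv.1 with
        | none =>
          have hc : q.2.contains kv.1 = false := by
            rw [PySem.Dict.contains_eq_isSome_get?, hq]; rfl
          simp [hc, PySem.Dict.get?_insert]
        | some m =>
          have hc : q.2.contains kv.1 = true := by
            rw [PySem.Dict.contains_eq_isSome_get?, hq]; rfl
          have hd : q.2.getD kv.1 0 = m := by rw [PySem.Dict.getD_eq_get?_getD, hq]; rfl
          by_cases hlt : kv.2 < m
          · simp [hc, hd, hlt, PySem.Dict.get?_insert]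
          · simp [hc, hd, hlt, hq]
    · have hmT : (c, v) ∈ T := by
        rcases List.mem_cons.mp hmem with h | h
        · exact absurd (congrArg Prod.fst h).symm hk
        · exact h
      have := ih hmT hnd.2 (pvInnerStep q kv)
      have hk' : ¬ c = kv.1 := fun h => hk h.symm
      simp only [List.foldl_cons]
      refine ⟨?_, ?_⟩
      · rw [this.1]
        simp [pvInnerStep, PySem.Dict.getD_eq_get?_getD, PySem.Dict.get?_insert, hk']
      · rw [this.2]
        simp only [pvInnerStep]
        congr 1
        split
        · simp [PySem.Dict.get?_insert, hk']
        · rfl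

theorem pvOuter_inv (Ss : List String) (c : Char)
    (q : PySem.Dict Char Int × PySem.Dict Char Int) :
    (Ss.foldl pvOuterStep q).1.getD c 0
        = q.1.getD c 0 + (Ss.countP (fun s => decide (c ∈ s.toList)) : Int) ∧
    (Ss.foldl pvOuterStep q).2.get? c
        = Ss.foldl (fun o s => if c ∈ s.toList then pvCombine o (s.toList.count c : Int) else o)
            (q.2.get? c) := by
  induction Ss generalizing q with
  | nil => simp
  | cons s T ih =>
    have hstep : pvOuterStep q s = (PySem.Dict.counter s.toList).items.foldl pvInnerStep q := by
      show (s.toList.foldl (fun d ch => d.insert ch (d.getD ch 0 + 1)) PySem.Dict.empty).items.foldl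
        pvInnerStep q = _
      rw [PySem.Dict.foldl_insert_getD_add_one_eq_counter]
    have hitems : (PySem.Dict.counter s.toList).items
        = (PySem.Set.ofList s.toList).map (fun k => (k, (s.toList.count k : Int))) :=
      PySem.Dict.items_counter s.toList
    have hkeys : ((PySem.Dict.counter s.toList).items.map Prod.fst) = PySem.Set.ofList s.toList := by
      rw [hitems, List.map_map]
      exact List.map_id _
    have := ih (pvOuterStep q s)
    by_cases hc : c ∈ s.toList
    · have hmem : (c, (s.toList.count c : Int)) ∈ (PySem.Dict.counter s.toList).items := by
        rw [hitems]
        exact List.mem_map_of_mem ((PySem.Set.mem_ofList _ _).mpr hc)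
      have hnd : ((PySem.Dict.counter s.toList).items.map Prod.fst).Nodup := by
        rw [hkeys]; exact PySem.Set.nodup_ofList s.toList
      have hhit := pvInner_hit _ c _ hmem hnd q
      simp only [List.foldl_cons]
      constructor
      · rw [this.1]
        have : (pvOuterStep q s).1.getD c 0 = q.1.getD c 0 + 1 := by
          rw [hstep, PySem.Dict.getD_eq_get?_getD, hhit.1]; rfl
        rw [this, List.countP_cons]
        simp [hc]; ring
      · rw [this.2]
        have : (pvOuterStep q s).2.get? c = pvCombine (q.2.get? c) (s.toList.count c : Int) := by
          rw [hstep, hhit.2]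
        rw [this, if_pos hc]
    · have hcm : c ∉ (PySem.Dict.counter s.toList).items.map Prod.fst := by
        rw [hkeys]; exact fun h => hc ((PySem.Set.mem_ofList _ _).mp h)
      have hmiss := pvInner_miss _ c hcm q
      simp only [List.foldl_cons]
      constructor
      · rw [this.1]
        have : (pvOuterStep q s).1.getD c 0 = q.1.getD c 0 := by
          rw [PySem.Dict.getD_eq_get?_getD, hstep, hmiss.1, ← PySem.Dict.getD_eq_get?_getD]
        rw [this, List.countP_cons]
        simp [hc]
      · rw [this.2]
        have : (pvOuterStep q s).2.get? c = q.2.get? c := by rw [hstep, hmiss.2]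
        rw [this, if_neg hc]

theorem pvMinFold_eq (Ss : List String) (c : Char) (o : Option Int) :
    Ss.foldl (fun o s => if c ∈ s.toList then pvCombine o (s.toList.count c : Int) else o) o
      = (pvVs c Ss).foldl pvCombine o := by
  rw [pvVs, List.foldl_map, ← PySem.List.foldl_ite_eq_foldl_filter]

theorem pvCombine_some (t : List Int) (m : Int) :
    t.foldl pvCombine (some m) = some (t.foldl min m) := by
  induction t generalizing m with
  | nil => rfl
  | cons v T ih =>
    simp only [List.foldl_cons]
    have hcv : pvCombine (some m) v = some (min m v) := by
      simp only [pvCombine]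
      rcases lt_or_ge v m with h | h
      · rw [if_pos h, min_eq_right h.le]
      · rw [if_neg (not_lt.mpr h), min_eq_left h]
    rw [hcv, ih]

theorem pvVsA_eq (Ss : List String) (c : Char) :
    ((Ss.foldl (fun acc s => acc ++ [PySem.Dict.counter s.toList]) []).foldl
      (fun vs ctr => if ctr.contains c then vs ++ [ctr.getD c 0] else vs) ([] : List Int))
      = pvVs c Ss := by
  rw [PySem.List.foldl_append_singleton_eq_map, List.nil_append,
      PySem.List.foldl_append_if, List.nil_append, List.filter_map, List.map_map]
  unfold pvVs
  have h1 : ((fun ctr : PySem.Dict Char Int => ctr.contains c) ∘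
      fun s : String => PySem.Dict.counter s.toList) = fun s => decide (c ∈ s.toList) := by
    funext s
    simp [Function.comp, PySem.Dict.contains_counter]
  rw [h1]
  apply List.map_congr_left
  intro s _
  simp only [Function.comp]
  rw [PySem.Dict.getD_counter]

theorem pvJoinEmpty_flatten : ∀ (L : List (List Char)), PySem.Chars.join [] L = L.flatten
  | [] => rfl
  | [x] => by simp [PySem.Chars.join, List.intercalate]
  | x :: y :: T => by rw [PySem.Chars.join_cons_cons, pvJoinEmpty_flatten (y :: T)]; simp

theorem pvJoin_append (b : List String) (x : String) :
    PySem.Str.join "" (b ++ [x]) = PySem.Str.join "" b ++ x := by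
  simp [PySem.Str.join, pvJoinEmpty_flatten]

theorem pvFinal_eq (l : List Char) (P Q : Char → Prop) [DecidablePred P] [DecidablePred Q]
    (g h : Char → String) (a : String) (b : List String)
    (hab : a = PySem.Str.join "" b)
    (hPQ : ∀ c ∈ l, (P c ↔ Q c) ∧ (P c → g c = h c)) :
    l.foldl (fun ans c => if P c then ans ++ g c else ans) a
      = PySem.Str.join "" (l.foldl (fun ans c => if Q c then ans ++ [h c] else ans) b) := by
  induction l generalizing a b with
  | nil => exact hab
  | cons c T ih =>
    simp only [List.foldl_cons]
    have hc := hPQ c (List.mem_cons_self ..)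
    by_cases hp : P c
    · rw [if_pos hp, if_pos (hc.1.mp hp)]
      exact ih _ _ (by rw [pvJoin_append, ← hab, hc.2 hp]) (fun d hd => hPQ d (List.mem_cons_of_mem _ hd))
    · rw [if_neg hp, if_neg (fun hq => hp (hc.1.mpr hq))]
      exact ih _ _ hab (fun d hd => hPQ d (List.mem_cons_of_mem _ hd))

-- ===== VERDICT (by name: the statement is the Claim_ definition above) =====
theorem solve_spec : Claim_equal_solve := by
  intro N Ss _ hpre
  unfold Spec_solve solve solve_alt
  have hinv := fun c => pvOuter_inv Ss c (PySem.Dict.empty, PySem.Dict.empty)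
  set p := Ss.foldl pvOuterStep (PySem.Dict.empty, PySem.Dict.empty) with hp
  apply pvFinal_eq
  · rfl
  · intro c hcl
    have hdf : p.1.getD c 0 = (Ss.countP (fun s => decide (c ∈ s.toList)) : Int) := by
      have := (hinv c).1
      simpa using this
    have hvs := pvVsA_eq Ss c
    have hlen : ((Ss.foldl (fun acc s => acc ++ [PySem.Dict.counter s.toList]) []).foldl
        (fun vs ctr => if ctr.contains c then vs ++ [ctr.getD c 0] else vs) ([] : List Int)).length
        = Ss.countP (fun s => decide (c ∈ s.toList)) := by
      rw [hvs, pvVs, List.length_map, ← List.countP_eq_length_filter]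
    constructor
    · rw [hlen, hdf]
    · intro hP
      rw [hlen] at hP
      -- the branch fires: vs is nonempty (else N = 0 and Pre_ forces every letter present)
      have hne : pvVs c Ss ≠ [] := by
        intro hnil
        have h0 : Ss.countP (fun s => decide (c ∈ s.toList)) = 0 := by
          have := congrArg List.length hnil
          simpa [pvVs] using this
        rw [h0] at hP
        rcases hpre with hN | hall
        · exact hN hP.symm
        · obtain ⟨s, hsSs, hcs⟩ := hall c hcl
          have : s ∈ Ss.filter (fun s => decide (c ∈ s.toList)) :=
            List.mem_filter.mpr ⟨hsSs, by simpa using hcs⟩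
          rw [show Ss.filter (fun s => decide (c ∈ s.toList)) = [] from
            List.eq_nil_of_length_eq_zero (by rw [← List.countP_eq_length_filter]; exact h0)] at this
          cases this
      obtain ⟨x, t, hxt⟩ := List.exists_cons_of_ne_nil hne
      have hminc : p.2.get? c = some (t.foldl min x) := by
        have := (hinv c).2
        rw [PySem.Dict.get?_empty] at this
        rw [this, pvMinFold_eq, hxt]
        simp only [List.foldl_cons]
        exact pvCombine_some t x
      have hminA : PySem.List.min? ((Ss.foldl (fun acc s => acc ++ [PySem.Dict.counter s.toList]) []).foldl
          (fun vs ctr => if ctr.contains c then vs ++ [ctr.getD c 0] else vs) ([] : List Int)) (fun x => x)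
          = some (t.foldl min x) := by
        rw [hvs, hxt]
        exact PySem.List.min?_id_cons x t
      rw [hminA, PySem.Dict.getD_eq_get?_getD, hminc]
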